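-- pv_equiv track=rewrite | github.com/anetczuk/gcc-uml | src/gccuml/langcontent.py | props_list_to_dict
-- ===== SOURCE A (Python) =====
-- from typing import Dict, List, Any, Tuple
--
-- def props_list_to_dict(props_list: List[Tuple[str, str]]) -> Dict[str, Any]:
--     ret_dict: Dict[str, Any] = {}
--     for next_key, next_val in props_list:
--         sublist = ret_dict.get(next_key)
--         if sublist is None:
--             sublist = []
--             ret_dict[next_key] = sublist
--         sublist.append(next_val)
--
--     ## convert lists
--     for key, val_list in list(ret_dict.items()):
--         if len(val_list) < 2:
--             ## reduce list
--             val = val_list[0]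
--             ret_dict[key] = val
--             continue
--         # for backward compatibility convert list to list of keys with index like "{prop}_0" etc
--         del ret_dict[key]
--         for index, item in enumerate(val_list):
--             new_key = f"{key}_{index}"
--             ret_dict[new_key] = item
--
--     return ret_dict
-- ===== SOURCE B (Python) =====
-- def props_list_to_dict(props_list):
--     counts = {}
--     for key, _val in props_list:
--         counts[key] = counts.get(key, 0) + 1
--     result = {key: val for key, val in props_list if counts[key] == 1}
--     for key in counts:
--         if counts[key] > 1:
--             index = 0
--             for key2, val in props_list:
--                 if key2 == key:
--                     result[f"{key}_{index}"] = val
--                     index += 1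
--     return result
-- ===== Notes on version B (the rewrite author's own statement) =====
-- stated objective: alternative
-- what changed: B never builds intermediate per-key value lists: it counts keys in one pass, emits all singleton pairs with a dict comprehension, then expands each duplicated key by a direct indexed rescan of the input; Pre_ excludes lists where an expanded key name '{key}_{i}' collides with an existing key, on which A's silent in-place overwrites produce an accidental result.
import Mathlib
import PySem

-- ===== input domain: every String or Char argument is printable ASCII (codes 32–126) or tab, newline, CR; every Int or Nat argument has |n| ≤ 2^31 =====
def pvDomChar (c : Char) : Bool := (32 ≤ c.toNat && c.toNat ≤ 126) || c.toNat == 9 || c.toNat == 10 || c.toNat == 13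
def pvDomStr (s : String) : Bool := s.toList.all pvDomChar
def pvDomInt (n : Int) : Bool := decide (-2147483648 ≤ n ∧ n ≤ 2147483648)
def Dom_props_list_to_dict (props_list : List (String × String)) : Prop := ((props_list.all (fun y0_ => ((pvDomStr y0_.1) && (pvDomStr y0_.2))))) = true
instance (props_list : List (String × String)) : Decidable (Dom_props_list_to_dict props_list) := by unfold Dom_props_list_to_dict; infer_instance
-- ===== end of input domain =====

-- B counts keys once and emits singletons by a comprehension and duplicate expansions by
-- indexed rescans, instead of A's grouping into per-key lists and rewriting the dict (alternative).


-- ===== PORT A =====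
-- first loop of A: group values into per-key lists (sublist append = re-insert of the
-- appended list at the same key, which keeps the entry's position, as Python's mutation does)
def pvGroupA (props_list : List (String × String)) : PySem.Dict String (List String) :=
  props_list.foldl (fun d p =>
    match PySem.Dict.get? d p.1 with
    | none => PySem.Dict.insert d p.1 ([] ++ [p.2])
    | some sub => PySem.Dict.insert d p.1 (sub ++ [p.2])) (PySem.Dict.mk [])

-- second loop of A over the items snapshot; the dict values are Python "Any":
-- Sum.inr = still a list (phase 1), Sum.inl = already reduced to a string
def props_list_to_dict (props_list : List (String × String)) : List (String × String) :=
  let ret1 := pvGroupA props_list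
  let d0 : PySem.Dict String (String ⊕ List String) :=
    PySem.Dict.mk (ret1.items.map (fun kv => (kv.1, Sum.inr kv.2)))
  let d2 := ret1.items.foldl (fun d kv =>
    if kv.2.length < 2 then
      -- val = val_list[0] (the list is nonempty by construction of phase 1)
      PySem.Dict.insert d kv.1 (Sum.inl (PySem.List.pyGetD kv.2 0 ""))
    else
      (PySem.List.enumerate kv.2 0).foldl
        (fun d e => PySem.Dict.insert d (kv.1 ++ "_" ++ PySem.Int.toStr e.1) (Sum.inl e.2))
        (PySem.Dict.erase d kv.1)) d0
  -- the returned dict: every value is a string by then (Sum.inr is unreachable)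
  d2.items.map (fun kv => (kv.1, match kv.2 with | Sum.inl s => s | Sum.inr l => PySem.List.pyGetD l 0 ""))

-- ===== PORT B =====
-- counts = {} loop of B: key -> number of occurrences
def pvCountsB (props_list : List (String × String)) : PySem.Dict String Int :=
  props_list.foldl (fun c p => PySem.Dict.insert c p.1 (PySem.Dict.getD c p.1 0 + 1)) (PySem.Dict.mk [])

-- result = {key: val for key, val in props_list if counts[key] == 1}  (key is always present in counts)
def pvResult0B (props_list : List (String × String)) : PySem.Dict String String :=
  (props_list.filter (fun p => PySem.Dict.getD (pvCountsB props_list) p.1 0 == 1)).foldl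
    (fun r p => PySem.Dict.insert r p.1 p.2) (PySem.Dict.mk [])

-- for key in counts: if counts[key] > 1: indexed rescan of props_list for that key
def props_list_to_dict_alt (props_list : List (String × String)) : List (String × String) :=
  ((pvCountsB props_list).keys.foldl (fun r k =>
    if 1 < PySem.Dict.getD (pvCountsB props_list) k 0 then
      (props_list.foldl (fun (st : PySem.Dict String String × Int) p =>
        if p.1 == k then (PySem.Dict.insert st.1 (k ++ "_" ++ PySem.Int.toStr st.2) p.2, st.2 + 1)
        else st) (r, 0)).1
    else r) (pvResult0B props_list)).items

-- ===== PRECONDITION & SPEC =====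
-- all index-expanded key names "{key}_{i}" A would generate (for keys occurring ≥ 2 times)
def pvGenKeys (props_list : List (String × String)) : List String :=
  (PySem.List.dedup (props_list.map Prod.fst)).flatMap (fun k =>
    if 2 ≤ (props_list.map Prod.fst).count k then
      (List.range ((props_list.map Prod.fst).count k)).map (fun i : Nat => k ++ "_" ++ PySem.Int.toStr (i : Int))
    else [])

-- Pre_ excludes lists in which an expanded key name "{key}_{i}" of a duplicated key collides with
-- another key, where A's silent in-place dict overwrites produce an accidental result (the Nodup
-- conjunct over the generated names themselves never fails, it only keeps the condition local).
def Pre_props_list_to_dict (props_list : List (String × String)) : Prop :=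
  (∀ g ∈ pvGenKeys props_list, g ∉ props_list.map Prod.fst) ∧ (pvGenKeys props_list).Nodup
instance (props_list : List (String × String)) : Decidable (Pre_props_list_to_dict props_list) := by
  unfold Pre_props_list_to_dict; infer_instance

def pvWitness_props_list_to_dict : (List (String × String)) := [("a", "x"), ("a", "y"), ("b", "z")]

def Spec_props_list_to_dict (props_list : List (String × String)) (out : List (String × String)) : Prop := out = props_list_to_dict_alt props_list
instance (props_list : List (String × String)) (out : List (String × String)) : Decidable (Spec_props_list_to_dict props_list out) := by unfold Spec_props_list_to_dict; infer_instance

-- ===== CLAIM (what is proved, stated in full; the proofs are below) =====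
def Claim_equal_props_list_to_dict : Prop := ∀ (props_list : List (String × String)), Dom_props_list_to_dict props_list → Pre_props_list_to_dict props_list → Spec_props_list_to_dict props_list (props_list_to_dict props_list)

-- ===== LEMMAS AND PROOFS =====
def pvKS (l : List (String × String)) : List String := PySem.List.dedup (l.map Prod.fst)
def pvGrp (l : List (String × String)) (k : String) : List String :=
  (l.filter (fun p => p.1 == k)).map Prod.snd
theorem pv_cnt_eq_grp_len (l : List (String × String)) (k : String) :
    (l.map Prod.fst).count k = (pvGrp l k).length := by
  simp only [pvGrp, List.count, List.length_map, List.countP_eq_length_filter, List.filter_map]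
  rfl

theorem pv_groupA_eq_modify (l : List (String × String)) :
    pvGroupA l = l.foldl (fun d p => PySem.Dict.modify d p.1 [] (fun x => x ++ [p.2])) (PySem.Dict.mk []) := by
  unfold pvGroupA
  congr 1
  funext d p
  cases h : PySem.Dict.get? d p.1 <;>
    simp [PySem.Dict.modify, PySem.Dict.getD, h]

theorem pv_groupA_keys (l : List (String × String)) : (pvGroupA l).keys = pvKS l := by
  rw [pv_groupA_eq_modify]
  have := PySem.Dict.keys_foldl_modify_key l Prod.fst [] (fun _ p x => x ++ [p.2]) (PySem.Dict.mk [])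
  simp at this ⊢
  rw [this]
  simp [pvKS, PySem.Set.update, PySem.List.dedup, PySem.Set.ofList, PySem.Set.empty]

theorem pv_groupA_getD (l : List (String × String)) (k : String) :
    (pvGroupA l).getD k [] = pvGrp l k := by
  rw [pv_groupA_eq_modify]
  have := PySem.Dict.getD_foldl_modify_append l (PySem.Dict.mk []) k
  simp at this ⊢
  rw [this]
  simp [pvGrp, PySem.Dict.getD, PySem.Dict.get?]

theorem pv_groupA_items (l : List (String × String)) :
    (pvGroupA l).items = (pvKS l).map (fun k => (k, pvGrp l k)) := by
  have hnd : (pvGroupA l).keys.Nodup := by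
    rw [pv_groupA_keys]; exact PySem.List.nodup_dedup _
  rw [PySem.Dict.items_eq_map_keys _ hnd []]
  rw [pv_groupA_keys]
  exact List.map_congr_left (fun k _ => by rw [pv_groupA_getD])

def pvGen (k : String) (i : Int) : String := k ++ "_" ++ PySem.Int.toStr i
def pvGenL (kv : String × List String) : List String :=
  if 2 ≤ kv.2.length then (List.range kv.2.length).map (fun i : Nat => pvGen kv.1 (i : Int)) else []
def pvStepA (d : PySem.Dict String (String ⊕ List String)) (kv : String × List String) :
    PySem.Dict String (String ⊕ List String) :=
  if kv.2.length < 2 then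
    PySem.Dict.insert d kv.1 (Sum.inl (PySem.List.pyGetD kv.2 0 ""))
  else
    (PySem.List.enumerate kv.2 0).foldl
      (fun d e => PySem.Dict.insert d (kv.1 ++ "_" ++ PySem.Int.toStr e.1) (Sum.inl e.2))
      (PySem.Dict.erase d kv.1)

theorem pv_map_fst_ne_id {V : Type} (xs : List (String × V)) (k : String) (w : V)
    (hx : k ∉ xs.map Prod.fst) :
    xs.map (fun p => if (p.1 == k) = true then (k, w) else p) = xs := by
  have h : xs.map (fun p => if (p.1 == k) = true then (k, w) else p) = xs.map id :=
    List.map_congr_left (fun (p : String × V) hp => by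
      have : p.1 ≠ k := fun h => hx (h ▸ List.mem_map_of_mem hp)
      simp [this])
  simpa using h

theorem pv_insert_existing {V : Type} (xs ys : List (String × V)) (k : String) (v w : V)
    (hx : k ∉ xs.map Prod.fst) (hy : k ∉ ys.map Prod.fst) :
    (PySem.Dict.insert (PySem.Dict.mk (xs ++ (k, v) :: ys)) k w).items = xs ++ (k, w) :: ys := by
  have hc : (PySem.Dict.mk (xs ++ (k, v) :: ys)).contains k = true := by
    simp [PySem.Dict.contains]
  simp only [PySem.Dict.insert, hc, if_pos]
  simp only [List.map_append, List.map_cons, beq_self_eq_true, if_pos]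
  rw [pv_map_fst_ne_id xs k w hx, pv_map_fst_ne_id ys k w hy]

theorem pv_erase_mid {V : Type} (xs ys : List (String × V)) (k : String) (v : V)
    (hx : k ∉ xs.map Prod.fst) (hy : k ∉ ys.map Prod.fst) :
    (PySem.Dict.erase (PySem.Dict.mk (xs ++ (k, v) :: ys)) k).items = xs ++ ys := by
  simp only [PySem.Dict.erase, List.filter_append, List.filter_cons, beq_self_eq_true,
    Bool.not_true, Bool.false_eq_true, if_false]
  congr 1
  · exact List.filter_eq_self.mpr (fun (p : String × V) hp => by
      have : p.1 ≠ k := fun h => hx (h ▸ List.mem_map_of_mem hp)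
      simp [this])
  · exact List.filter_eq_self.mpr (fun (p : String × V) hp => by
      have : p.1 ≠ k := fun h => hy (h ▸ List.mem_map_of_mem hp)
      simp [this])

theorem pv_contains_false {V : Type} (d : PySem.Dict String V) (k : String) :
    d.contains k = false ↔ k ∉ d.keys := by
  simp only [PySem.Dict.contains, PySem.Dict.keys]
  rw [← Bool.not_eq_true, List.any_eq_true]
  constructor
  · intro h hk
    obtain ⟨p, hp, hpk⟩ := List.mem_map.mp hk
    exact h ⟨p, hp, by simp [hpk]⟩
  · intro h hex
    obtain ⟨p, hp, hb⟩ := hex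
    exact h (List.mem_map.mpr ⟨p, hp, by simpa using hb⟩)

theorem pv_enum_keys {α : Type} (vs : List α) (g : Int → String) :
    (PySem.List.enumerate vs 0).map (fun e => g e.1) =
    (List.range vs.length).map (fun i : Nat => g (i : Int)) := by
  have h1 : (PySem.List.enumerate vs 0).map (fun e => g e.1) =
      ((PySem.List.enumerate vs 0).map Prod.fst).map g := by
    rw [List.map_map]; rfl
  rw [h1, PySem.List.map_fst_enumerate, PySem.List.pyRange_one, List.map_map]
  simp [Function.comp_def]


def pvInr (kv : String × List String) : String × (String ⊕ List String) := (kv.1, Sum.inr kv.2)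
def pvItemS (kv : String × List String) : String × (String ⊕ List String) :=
  (kv.1, Sum.inl (PySem.List.pyGetD kv.2 0 ""))
def pvExp (kv : String × List String) : List (String × (String ⊕ List String)) :=
  (PySem.List.enumerate kv.2 0).map (fun e => (pvGen kv.1 e.1, Sum.inl e.2))

set_option maxHeartbeats 1000000 in
theorem pv_A2 (rest : List (String × List String)) :
    ∀ (d : PySem.Dict String (String ⊕ List String))
      (pre post : List (String × (String ⊕ List String))),
    d.items = pre ++ rest.map pvInr ++ post →
    d.keys.Nodup →
    (∀ g ∈ (rest.map pvGenL).flatten, g ∉ d.keys) →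
    ((rest.map pvGenL).flatten).Nodup →
    (rest.foldl pvStepA d).items =
      pre ++ (rest.filter (fun kv => decide (kv.2.length < 2))).map pvItemS ++ post ++
      (rest.filter (fun kv => !decide (kv.2.length < 2))).flatMap pvExp := by
  induction rest with
  | nil => intro d pre post hd _ _ _; simpa using hd
  | cons kv tail ih =>
    intro d pre post hd hnd hfresh hgnd
    have hflcons : ((kv :: tail).map pvGenL).flatten = pvGenL kv ++ (tail.map pvGenL).flatten := by
      simp
    have hde : d = PySem.Dict.mk (pre ++ (kv.1, Sum.inr kv.2) :: (tail.map pvInr ++ post)) := by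
      apply PySem.Dict.ext
      simpa [pvInr] using hd
    have hkeys : d.keys = pre.map Prod.fst ++ kv.1 :: (tail.map pvInr ++ post).map Prod.fst := by
      rw [hde]
      show (pre ++ (kv.1, Sum.inr kv.2) :: (tail.map pvInr ++ post)).map (fun x => x.1) = _
      simp
    have hknd := hnd
    rw [hkeys] at hknd
    have hpre1 : kv.1 ∉ pre.map Prod.fst := by
      intro hmem
      exact (List.nodup_append.mp hknd).2.2 kv.1 hmem kv.1 (by simp) rfl
    have hys1 : kv.1 ∉ (tail.map pvInr ++ post).map Prod.fst :=
      (List.nodup_cons.mp (List.Nodup.of_append_right hknd)).1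
    by_cases hlen : kv.2.length < 2
    · -- singleton entry: replaced in place
      have hstep : (pvStepA d kv).items =
          pre ++ pvItemS kv :: (tail.map pvInr ++ post) := by
        rw [pvStepA, if_pos hlen, hde]
        exact pv_insert_existing _ _ _ _ _ hpre1 hys1
      have hkeys' : (pvStepA d kv).keys = d.keys := by
        rw [hkeys]
        show (pvStepA d kv).items.map (fun x => x.1) = _
        rw [hstep]
        simp [pvItemS]
      have hd' : (pvStepA d kv).items =
          (pre ++ [pvItemS kv]) ++ tail.map pvInr ++ post := by
        simp [hstep]
      have hfl : (tail.map pvGenL).flatten.Sublist ((kv :: tail).map pvGenL).flatten := by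
        rw [hflcons]; exact List.sublist_append_right _ _
      have hrec := ih (pvStepA d kv) (pre ++ [pvItemS kv]) post hd'
        (by rw [hkeys']; exact hnd)
        (fun g hg => by rw [hkeys']; exact hfresh g (hfl.mem hg))
        (hgnd.sublist hfl)
      rw [List.foldl_cons, hrec]
      have ht : decide (kv.2.length < 2) = true := by simpa using hlen
      simp only [List.filter_cons, ht, Bool.not_true, Bool.false_eq_true, if_false, if_pos,
        List.map_cons]
      simp [List.append_assoc]
    · -- duplicated entry: deleted, expansions appended at the end
      have h2 : 2 ≤ kv.2.length := by omega
      have hgenl : pvGenL kv = (List.range kv.2.length).map (fun i : Nat => pvGen kv.1 (i : Int)) := by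
        rw [pvGenL, if_pos h2]
      have herase : (PySem.Dict.erase d kv.1).items = pre ++ (tail.map pvInr ++ post) := by
        rw [hde]; exact pv_erase_mid _ _ _ _ hpre1 hys1
      have hekeys : (PySem.Dict.erase d kv.1).keys =
          pre.map Prod.fst ++ (tail.map pvInr ++ post).map Prod.fst := by
        show (PySem.Dict.erase d kv.1).items.map (fun x => x.1) = _
        rw [herase]; simp
      have hesub : ∀ g, g ∈ (PySem.Dict.erase d kv.1).keys → g ∈ d.keys := by
        intro g hg
        rw [hekeys] at hg
        rw [hkeys]
        rcases List.mem_append.mp hg with h | h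
        · exact List.mem_append.mpr (Or.inl h)
        · exact List.mem_append.mpr (Or.inr (List.mem_cons_of_mem _ h))
      have hmemgen : ∀ e ∈ PySem.List.enumerate kv.2 0, pvGen kv.1 e.1 ∈ pvGenL kv := by
        intro e he
        obtain ⟨j, hj, rfl⟩ := (PySem.List.mem_enumerate_iff _ _ _).mp he
        rw [hgenl]
        exact List.mem_map.mpr ⟨j, List.mem_range.mpr hj, by simp⟩
      have hgen_not_dkeys : ∀ g ∈ pvGenL kv, g ∉ d.keys := by
        intro g hg
        exact hfresh g (by rw [hflcons]; exact List.mem_append.mpr (Or.inl hg))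
      have hmapkeysexp : (pvExp kv).map Prod.fst = pvGenL kv := by
        rw [pvExp, List.map_map]
        exact (pv_enum_keys kv.2 (pvGen kv.1)).trans hgenl.symm
      have hinner : (pvStepA d kv).items = (PySem.Dict.erase d kv.1).items ++ pvExp kv := by
        rw [pvStepA, if_neg hlen]
        have heq : ((PySem.List.enumerate kv.2 0).map (fun e => pvGen kv.1 e.1)).Nodup := by
          rw [pv_enum_keys kv.2 (pvGen kv.1), ← hgenl]
          rw [hflcons] at hgnd
          exact hgnd.of_append_left
        have hff : ∀ e ∈ PySem.List.enumerate kv.2 0,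
            (PySem.Dict.erase d kv.1).contains (pvGen kv.1 e.1) = false := by
          intro e he
          rw [pv_contains_false]
          intro hmem
          exact hgen_not_dkeys _ (hmemgen e he) (hesub _ hmem)
        rw [pvExp]
        exact PySem.Dict.items_foldl_insert_fresh (PySem.List.enumerate kv.2 0)
          (fun e => pvGen kv.1 e.1) (fun e => (Sum.inl e.2 : String ⊕ List String))
          (PySem.Dict.erase d kv.1) hff heq
      have hd' : (pvStepA d kv).items =
          pre ++ tail.map pvInr ++ (post ++ pvExp kv) := by
        rw [hinner, herase]; simp [List.append_assoc]
      have hkeys' : (pvStepA d kv).keys = (PySem.Dict.erase d kv.1).keys ++ pvGenL kv := by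
        show (pvStepA d kv).items.map (fun x => x.1) = _
        rw [hinner, List.map_append]
        rw [show ((PySem.Dict.erase d kv.1).items.map (fun x => x.1)) = (PySem.Dict.erase d kv.1).keys from rfl]
        rw [show ((pvExp kv).map (fun x => x.1)) = (pvExp kv).map Prod.fst from rfl, hmapkeysexp]
      have hnd' : (pvStepA d kv).keys.Nodup := by
        rw [hkeys', List.nodup_append]
        refine ⟨?_, ?_, ?_⟩
        · rw [hekeys]
          rw [hkeys] at hnd
          exact hnd.sublist (List.Sublist.append_left (List.sublist_cons_self _ _) _)
        · rw [hflcons] at hgnd; exact hgnd.of_append_left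
        · intro a ha b hb heq
          subst heq
          exact hgen_not_dkeys a hb (hesub a ha)
      have hfresh' : ∀ g ∈ (tail.map pvGenL).flatten, g ∉ (pvStepA d kv).keys := by
        intro g hg
        rw [hkeys']
        intro hmem
        rcases List.mem_append.mp hmem with h | h
        · exact hfresh g (by rw [hflcons]; exact List.mem_append.mpr (Or.inr hg)) (hesub g h)
        · rw [hflcons] at hgnd
          exact (List.nodup_append.mp hgnd).2.2 g h g hg rfl
      have hgnd' : ((tail.map pvGenL).flatten).Nodup := by
        rw [hflcons] at hgnd; exact hgnd.of_append_right
      have hrec := ih (pvStepA d kv) pre (post ++ pvExp kv) hd' hnd' hfresh' hgnd'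
      rw [List.foldl_cons, hrec]
      have ht : decide (kv.2.length < 2) = false := by simpa using hlen
      simp only [List.filter_cons, ht, Bool.not_false, Bool.false_eq_true, if_false, if_pos,
        List.flatMap_cons]
      simp [List.append_assoc]

theorem pv_dedup_append (xs : List String) (x : String) :
    PySem.List.dedup (xs ++ [x]) =
      if x ∈ PySem.List.dedup xs then PySem.List.dedup xs else PySem.List.dedup xs ++ [x] := by
  simp only [PySem.List.dedup, PySem.Set.ofList, List.foldl_append, List.foldl_cons, List.foldl_nil]
  simp only [PySem.Set.add]
  split_ifs with h1 h2 h2 <;> simp_all [List.contains_eq_mem]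

theorem pv_grp_append (l : List (String × String)) (p : String × String) (k : String) :
    pvGrp (l ++ [p]) k = pvGrp l k ++ (if p.1 == k then [p.2] else []) := by
  simp only [pvGrp, List.filter_append, List.map_append, List.filter_cons, List.filter_nil]
  by_cases h : p.1 == k <;> simp [h]

theorem pv_grp_nil_iff (l : List (String × String)) (k : String) :
    pvGrp l k = [] ↔ k ∉ l.map Prod.fst := by
  simp only [pvGrp, List.map_eq_nil_iff, List.filter_eq_nil_iff, List.mem_map]
  constructor
  · rintro h ⟨p, hp, rfl⟩
    exact absurd (by simp : (p.1 == p.1) = true) (h p hp)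
  · intro h p hp hpk
    exact h ⟨p, hp, (beq_iff_eq.mp hpk)⟩

theorem pv_M (l : List (String × String)) : ∀ (future : List String),
    l.filter (fun p => decide ((l.map Prod.fst).count p.1 + future.count p.1 = 1)) =
    ((pvKS l).filter (fun k => decide ((l.map Prod.fst).count k + future.count k = 1))).map
      (fun k => (k, PySem.List.pyGetD (pvGrp l k) 0 "")) := by
  induction l using List.reverseRecOn with
  | nil => intro future; simp [pvKS, PySem.List.dedup, PySem.Set.ofList, PySem.Set.empty]
  | append_singleton l p ih =>
    intro future
    -- the counting predicate over l++[p] equals the one over l with p.1 pushed to future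
    have hcnteq : ∀ q : String,
        ((l ++ [p]).map Prod.fst).count q + future.count q
          = (l.map Prod.fst).count q + (p.1 :: future).count q := by
      intro q
      simp only [List.map_append, List.count_append, List.count_cons]
      by_cases h : p.1 = q
      · simp [h]
        omega
      · simp [h]
    have hfeq : (fun pr : String × String => decide (((l ++ [p]).map Prod.fst).count pr.1 + future.count pr.1 = 1))
        = (fun pr : String × String => decide ((l.map Prod.fst).count pr.1 + (p.1 :: future).count pr.1 = 1)) := by
      funext pr; rw [hcnteq]
    have hkeq : ∀ k : String, decide (((l ++ [p]).map Prod.fst).count k + future.count k = 1)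
        = decide ((l.map Prod.fst).count k + (p.1 :: future).count k = 1) := by
      intro k; rw [hcnteq]
    rw [List.filter_append, hfeq, ih (p.1 :: future)]
    by_cases hmem : p.1 ∈ l.map Prod.fst
    · -- p's key already seen: no new key in pvKS, group of p.1 merely grows at the end
      have hks : pvKS (l ++ [p]) = pvKS l := by
        rw [pvKS, List.map_append]
        simp only [List.map_cons, List.map_nil]
        rw [pv_dedup_append]
        rw [if_pos (by rwa [PySem.List.mem_dedup])]
        rfl
      have hcnt1 : (l.map Prod.fst).count p.1 ≥ 1 := List.one_le_count_iff.mpr hmem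
      have hlast : List.filter (fun pr : String × String =>
          decide (((l ++ [p]).map Prod.fst).count pr.1 + future.count pr.1 = 1)) [p] = [] := by
        simp only [List.filter_cons, List.filter_nil]
        rw [hcnteq]
        have : (p.1 :: future).count p.1 ≥ 1 := by simp
        rw [if_neg (by simp; omega)]
      rw [hfeq] at hlast
      have hfilt : (pvKS l).filter (fun k => decide (((l ++ [p]).map Prod.fst).count k + future.count k = 1))
          = (pvKS l).filter (fun k => decide ((l.map Prod.fst).count k + (p.1 :: future).count k = 1)) :=
        List.filter_congr (fun k _ => hkeq k)
      rw [hlast, List.append_nil, hks, hfilt]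
      refine (List.map_congr_left ?_).symm
      intro k hk
      have hk1 : k ∈ pvKS l := List.mem_of_mem_filter hk
      by_cases hkp : k = p.1
      · -- the group grows, but index 0 is unchanged (group nonempty)
        have hne : pvGrp l k ≠ [] := by
          rw [Ne, pv_grp_nil_iff, hkp]; simpa using hmem
        rw [pv_grp_append, if_pos (by simp [hkp])]
        obtain ⟨a, t, heq⟩ := List.exists_cons_of_ne_nil hne
        rw [heq]
        simp [PySem.List.pyGetD_zero]
      · rw [pv_grp_append, if_neg (by simpa using (Ne.symm hkp)), List.append_nil]
    · -- fresh key: it is appended to pvKS, its group is exactly [p.2]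
      have hks : pvKS (l ++ [p]) = pvKS l ++ [p.1] := by
        rw [pvKS, List.map_append]
        simp only [List.map_cons, List.map_nil]
        rw [pv_dedup_append]
        rw [if_neg (by rwa [PySem.List.mem_dedup])]
        rfl
      have hcnt0 : (l.map Prod.fst).count p.1 = 0 := List.count_eq_zero.mpr hmem
      rw [hks, List.filter_append]
      have hfilt : (pvKS l).filter (fun k => decide (((l ++ [p]).map Prod.fst).count k + future.count k = 1))
          = (pvKS l).filter (fun k => decide ((l.map Prod.fst).count k + (p.1 :: future).count k = 1)) :=
        List.filter_congr (fun k _ => hkeq k)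
      rw [hfilt, List.map_append]
      congr 1
      · -- values agree on old keys (all different from p.1)
        refine List.map_congr_left ?_
        intro k hk
        have hk1 : k ∈ pvKS l := List.mem_of_mem_filter hk
        have hkp : k ≠ p.1 := by
          intro h; subst h
          exact hmem ((PySem.List.mem_dedup _ _).mp hk1)
        rw [pv_grp_append, if_neg (by simpa using (Ne.symm hkp)), List.append_nil]
      · -- the tail: [p] filtered ↔ [p.1] filtered, both by the same count condition
        have hgrpp : pvGrp (l ++ [p]) p.1 = [p.2] := by
          rw [pv_grp_append]
          rw [(pv_grp_nil_iff l p.1).mpr hmem]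
          simp
        simp only [List.filter_cons, List.filter_nil, hkeq p.1]
        by_cases hcond : ((l.map Prod.fst).count p.1 + (p.1 :: future).count p.1 = 1)
        · rw [if_pos (by simpa using hcond), if_pos (by simpa using hcond)]
          simp [hgrpp, PySem.List.pyGetD_zero]
        · rw [if_neg (by simpa using hcond), if_neg (by simpa using hcond)]
          simp

def pvStepB (l : List (String × String)) (c : String → Nat)
    (r : PySem.Dict String String) (k : String) : PySem.Dict String String :=
  if 1 < (c k : Int) then
    (l.foldl (fun (st : PySem.Dict String String × Int) p =>
      if p.1 == k then (PySem.Dict.insert st.1 (k ++ "_" ++ PySem.Int.toStr st.2) p.2, st.2 + 1)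
      else st) (r, 0)).1
  else r

theorem pv_I1 (k : String) (l : List (String × String)) :
    ∀ (st : PySem.Dict String String × Int),
    l.foldl (fun st p =>
        if p.1 == k then (PySem.Dict.insert st.1 (k ++ "_" ++ PySem.Int.toStr st.2) p.2, st.2 + 1)
        else st) st
      = (pvGrp l k).foldl (fun st v =>
          (PySem.Dict.insert st.1 (k ++ "_" ++ PySem.Int.toStr st.2) v, st.2 + 1)) st := by
  induction l with
  | nil => intro st; rfl
  | cons p t ih =>
    intro st
    by_cases h : p.1 == k
    · simp only [List.foldl_cons, pvGrp, List.filter_cons, h, if_pos, List.map_cons, List.foldl_cons]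
      exact ih _
    · simp only [List.foldl_cons, pvGrp, List.filter_cons, h, Bool.false_eq_true, if_false]
      exact ih st

theorem pv_I2 (k : String) (vs : List String) :
    ∀ (r : PySem.Dict String String) (i : Int),
    (vs.foldl (fun st v =>
        (PySem.Dict.insert st.1 (k ++ "_" ++ PySem.Int.toStr st.2) v, st.2 + 1)) (r, i)).1
      = (PySem.List.enumerate vs i).foldl
          (fun d e => PySem.Dict.insert d (k ++ "_" ++ PySem.Int.toStr e.1) e.2) r := by
  induction vs with
  | nil => intro r i; rfl
  | cons v t ih =>
    intro r i
    rw [PySem.List.enumerate_cons, List.foldl_cons, List.foldl_cons]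
    exact ih _ _

theorem pv_B2 (l : List (String × String)) : ∀ (ks : List String) (r : PySem.Dict String String),
    r.keys.Nodup →
    (∀ g ∈ (ks.map (fun k => pvGenL (k, pvGrp l k))).flatten, g ∉ r.keys) →
    ((ks.map (fun k => pvGenL (k, pvGrp l k))).flatten).Nodup →
    (ks.foldl (pvStepB l (fun k => (pvGrp l k).length)) r).items =
      r.items ++ (ks.filter (fun k => !decide ((pvGrp l k).length < 2))).flatMap
        (fun k => (PySem.List.enumerate (pvGrp l k) 0).map (fun e => (pvGen k e.1, e.2))) := by
  intro ks
  induction ks with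
  | nil => intro r _ _ _; simp
  | cons k kt ih =>
    intro r hnd hfresh hgnd
    have hflcons : (((k :: kt).map (fun k => pvGenL (k, pvGrp l k))).flatten)
        = pvGenL (k, pvGrp l k) ++ ((kt.map (fun k => pvGenL (k, pvGrp l k))).flatten) := by
      simp
    by_cases hdup : 2 ≤ (pvGrp l k).length
    · have hcond : (1 : Int) < ((pvGrp l k).length : Nat) := by exact_mod_cast hdup
      have hgenl : pvGenL (k, pvGrp l k)
          = (List.range (pvGrp l k).length).map (fun i : Nat => pvGen k (i : Int)) := by
        rw [pvGenL, if_pos hdup]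
      have hstep : pvStepB l (fun k => (pvGrp l k).length) r k =
          (PySem.List.enumerate (pvGrp l k) 0).foldl
            (fun d e => PySem.Dict.insert d (k ++ "_" ++ PySem.Int.toStr e.1) e.2) r := by
        rw [pvStepB, if_pos hcond, pv_I1, pv_I2]
      have hgennod : ((PySem.List.enumerate (pvGrp l k) 0).map
          (fun e => k ++ "_" ++ PySem.Int.toStr e.1)).Nodup := by
        have := pv_enum_keys (pvGrp l k) (pvGen k)
        rw [show (fun e : Int × String => k ++ "_" ++ PySem.Int.toStr e.1)
            = (fun e : Int × String => pvGen k e.1) from rfl, this, ← hgenl]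
        rw [hflcons] at hgnd
        exact hgnd.of_append_left
      have hmemgen : ∀ e ∈ PySem.List.enumerate (pvGrp l k) 0, pvGen k e.1 ∈ pvGenL (k, pvGrp l k) := by
        intro e he
        obtain ⟨j, hj, rfl⟩ := (PySem.List.mem_enumerate_iff _ _ _).mp he
        rw [hgenl]
        exact List.mem_map.mpr ⟨j, List.mem_range.mpr hj, by simp⟩
      have hff : ∀ e ∈ PySem.List.enumerate (pvGrp l k) 0,
          r.contains (k ++ "_" ++ PySem.Int.toStr e.1) = false := by
        intro e he
        rw [show (k ++ "_" ++ PySem.Int.toStr e.1) = pvGen k e.1 from rfl]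
        rw [pv_contains_false]
        intro hmem
        exact hfresh _ (by rw [hflcons]; exact List.mem_append.mpr (Or.inl (hmemgen e he))) hmem
      have hitems : (pvStepB l (fun k => (pvGrp l k).length) r k).items =
          r.items ++ (PySem.List.enumerate (pvGrp l k) 0).map (fun e => (pvGen k e.1, e.2)) := by
        rw [hstep]
        exact PySem.Dict.items_foldl_insert_fresh (PySem.List.enumerate (pvGrp l k) 0)
          (fun e => pvGen k e.1) (fun e => e.2) r hff hgennod
      have hkeys' : (pvStepB l (fun k => (pvGrp l k).length) r k).keys =
          r.keys ++ pvGenL (k, pvGrp l k) := by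
        show (pvStepB l (fun k => (pvGrp l k).length) r k).items.map (fun x => x.1) = _
        rw [hitems, List.map_append]
        congr 1
        rw [List.map_map]
        exact (pv_enum_keys (pvGrp l k) (pvGen k)).trans hgenl.symm
      have hnd' : (pvStepB l (fun k => (pvGrp l k).length) r k).keys.Nodup := by
        rw [hkeys', List.nodup_append]
        refine ⟨hnd, by rw [hflcons] at hgnd; exact hgnd.of_append_left, ?_⟩
        intro a ha b hb heq
        subst heq
        exact hfresh a (by rw [hflcons]; exact List.mem_append.mpr (Or.inl hb)) ha
      have hfresh' : ∀ g ∈ (kt.map (fun k => pvGenL (k, pvGrp l k))).flatten,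
          g ∉ (pvStepB l (fun k => (pvGrp l k).length) r k).keys := by
        intro g hg
        rw [hkeys']
        intro hmem
        rcases List.mem_append.mp hmem with h | h
        · exact hfresh g (by rw [hflcons]; exact List.mem_append.mpr (Or.inr hg)) h
        · rw [hflcons] at hgnd
          exact (List.nodup_append.mp hgnd).2.2 g h g hg rfl
      have hgnd' : ((kt.map (fun k => pvGenL (k, pvGrp l k))).flatten).Nodup := by
        rw [hflcons] at hgnd; exact hgnd.of_append_right
      rw [List.foldl_cons, ih _ hnd' hfresh' hgnd']
      rw [hitems]
      have ht : (!decide ((pvGrp l k).length < 2)) = true := by simp; omega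
      simp only [List.filter_cons, ht, if_pos, List.flatMap_cons]
      simp [List.append_assoc]
    · have hcond : ¬ ((1 : Int) < ((pvGrp l k).length : Nat)) := by
        intro h
        have : 2 ≤ (pvGrp l k).length := by exact_mod_cast h
        exact hdup this
      have hstep : pvStepB l (fun k => (pvGrp l k).length) r k = r := by
        rw [pvStepB, if_neg hcond]
      have hgenl : pvGenL (k, pvGrp l k) = [] := by
        rw [pvGenL, if_neg (by simpa using hdup)]
      rw [hflcons, hgenl] at hfresh hgnd
      simp only [List.nil_append] at hfresh hgnd
      rw [List.foldl_cons, hstep, ih r hnd hfresh hgnd]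
      have ht : (!decide ((pvGrp l k).length < 2)) = false := by simp; omega
      simp only [List.filter_cons, ht, Bool.false_eq_true, if_false]

def pvUnwrap (kv : String × (String ⊕ List String)) : String × String :=
  (kv.1, match kv.2 with | Sum.inl s => s | Sum.inr l => PySem.List.pyGetD l 0 "")
def pvSingles (l : List (String × String)) : List (String × String) :=
  ((pvKS l).filter (fun k => decide ((pvGrp l k).length < 2))).map
    (fun k => (k, PySem.List.pyGetD (pvGrp l k) 0 ""))
def pvExps (l : List (String × String)) : List (String × String) :=
  ((pvKS l).filter (fun k => !decide ((pvGrp l k).length < 2))).flatMap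
    (fun k => (PySem.List.enumerate (pvGrp l k) 0).map (fun e => (pvGen k e.1, e.2)))

theorem pv_genkeys_eq (l : List (String × String)) :
    ((pvKS l).map (fun k => pvGenL (k, pvGrp l k))).flatten = pvGenKeys l := by
  rw [pvGenKeys]
  have h : ∀ ks : List String, (ks.map (fun k => pvGenL (k, pvGrp l k))).flatten =
      ks.flatMap (fun k => if 2 ≤ (l.map Prod.fst).count k then
        (List.range ((l.map Prod.fst).count k)).map (fun i : Nat => k ++ "_" ++ PySem.Int.toStr (i : Int))
      else []) := by
    intro ks
    induction ks with
    | nil => rfl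
    | cons k kt ih =>
      simp only [List.map_cons, List.flatten_cons, List.flatMap_cons, ih]
      congr 1
      rw [pvGenL, pv_cnt_eq_grp_len l k]
      rfl
  exact h (pvKS l)

theorem pv_grp_ne_nil (l : List (String × String)) (k : String) (hk : k ∈ pvKS l) :
    pvGrp l k ≠ [] := by
  rw [Ne, pv_grp_nil_iff]
  intro h
  exact h ((PySem.List.mem_dedup _ _).mp hk)

theorem pv_A_main (l : List (String × String)) (hpre : Pre_props_list_to_dict l) :
    props_list_to_dict l = pvSingles l ++ pvExps l := by
  have hS : (pvGroupA l).items = (pvKS l).map (fun k => (k, pvGrp l k)) := pv_groupA_items l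
  have hkeys0 : (PySem.Dict.mk ((pvGroupA l).items.map pvInr)).keys = pvKS l := by
    show ((pvGroupA l).items.map pvInr).map (fun x => x.1) = pvKS l
    rw [hS, List.map_map, List.map_map]
    simp [pvInr, Function.comp_def]
  have hflat : ((pvGroupA l).items.map pvGenL).flatten = pvGenKeys l := by
    rw [hS, List.map_map]
    exact pv_genkeys_eq l
  have hfresh : ∀ g ∈ ((pvGroupA l).items.map pvGenL).flatten,
      g ∉ (PySem.Dict.mk ((pvGroupA l).items.map pvInr)).keys := by
    intro g hg
    rw [hkeys0]
    intro hmem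
    rw [hflat] at hg
    exact hpre.1 g hg ((PySem.List.mem_dedup _ _).mp hmem)
  have hmain := pv_A2 (pvGroupA l).items (PySem.Dict.mk ((pvGroupA l).items.map pvInr)) [] []
    (by simp)
    (by rw [hkeys0]; exact PySem.List.nodup_dedup _)
    hfresh
    (by rw [hflat]; exact hpre.2)
  have hrw : props_list_to_dict l =
      ((pvGroupA l).items.foldl pvStepA (PySem.Dict.mk ((pvGroupA l).items.map pvInr))).items.map pvUnwrap := rfl
  rw [hrw, hmain, hS]
  simp only [List.nil_append, List.append_nil, List.map_append, List.filter_map, List.map_map,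
    List.map_flatMap, List.flatMap_map, Function.comp_def]
  rw [pvSingles, pvExps]
  congr 1
  have hexp : ∀ a : String, List.map pvUnwrap (pvExp (a, pvGrp l a)) =
      List.map (fun e => (pvGen a e.1, e.2)) (PySem.List.enumerate (pvGrp l a) 0) := by
    intro a
    rw [pvExp, List.map_map]
    rfl
  simp only [hexp]

theorem pv_countsB_eq (l : List (String × String)) :
    pvCountsB l = (l.map Prod.fst).foldl
      (fun c x => PySem.Dict.insert c x (PySem.Dict.getD c x 0 + 1)) (PySem.Dict.mk []) := by
  rw [pvCountsB, List.foldl_map]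

theorem pv_counts_getD (l : List (String × String)) (k : String) :
    PySem.Dict.getD (pvCountsB l) k 0 = (((l.map Prod.fst).count k : Nat) : Int) := by
  rw [pv_countsB_eq, PySem.Dict.getD_foldl_insert_add_one]
  simp [PySem.Dict.getD, PySem.Dict.get?]

theorem pv_counts_keys (l : List (String × String)) :
    (pvCountsB l).keys = pvKS l := by
  rw [pv_countsB_eq, PySem.Dict.keys_foldl_insert]
  rfl

theorem pv_F_keys_nodup (l : List (String × String)) :
    ((l.filter (fun p => decide ((l.map Prod.fst).count p.1 = 1))).map Prod.fst).Nodup := by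
  rw [List.nodup_iff_count_le_one]
  intro a
  by_cases hmem : a ∈ (l.filter (fun p => decide ((l.map Prod.fst).count p.1 = 1))).map Prod.fst
  · obtain ⟨p, hp, rfl⟩ := List.mem_map.mp hmem
    have h1 : (l.map Prod.fst).count p.1 = 1 := of_decide_eq_true ((List.mem_filter.mp hp).2)
    have hsub : ((l.filter (fun p => decide ((l.map Prod.fst).count p.1 = 1))).map Prod.fst).Sublist
        (l.map Prod.fst) := List.Sublist.map Prod.fst List.filter_sublist
    exact le_trans (List.Sublist.count_le p.1 hsub) (le_of_eq h1)
  · simp [List.count_eq_zero_of_not_mem hmem]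

theorem pv_result0_items (l : List (String × String)) :
    ((l.filter (fun p => decide ((l.map Prod.fst).count p.1 = 1))).foldl
        (fun r p => PySem.Dict.insert r p.1 p.2) (PySem.Dict.mk [])).items
      = l.filter (fun p => decide ((l.map Prod.fst).count p.1 = 1)) := by
  have h := PySem.Dict.items_foldl_insert_fresh
    (l.filter (fun p => decide ((l.map Prod.fst).count p.1 = 1))) Prod.fst Prod.snd
    (PySem.Dict.mk []) (fun a _ => rfl) (pv_F_keys_nodup l)
  simpa using h

theorem pv_F_eq_singles (l : List (String × String)) :
    l.filter (fun p => decide ((l.map Prod.fst).count p.1 = 1)) = pvSingles l := by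
  have hM := pv_M l []
  simp only [List.count_nil, Nat.add_zero] at hM
  refine hM.trans ?_
  rw [pvSingles]
  have hc : ∀ k ∈ pvKS l, (decide ((l.map Prod.fst).count k = 1))
      = (decide ((pvGrp l k).length < 2)) := by
    intro k hk
    have hne := pv_grp_ne_nil l k hk
    have hlen : 1 ≤ (pvGrp l k).length := List.length_pos_iff.mpr hne
    rw [pv_cnt_eq_grp_len l k]
    exact decide_eq_decide.mpr (by omega)
  congr 1
  exact List.filter_congr hc

theorem pv_result0B_eq (l : List (String × String)) :
    pvResult0B l = (l.filter (fun p => decide ((l.map Prod.fst).count p.1 = 1))).foldl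
      (fun r p => PySem.Dict.insert r p.1 p.2) (PySem.Dict.mk []) := by
  rw [pvResult0B]
  have hpq : (fun p : String × String => PySem.Dict.getD (pvCountsB l) p.1 0 == 1)
      = (fun p : String × String => decide ((l.map Prod.fst).count p.1 = 1)) := by
    funext p
    rw [pv_counts_getD l p.1]
    by_cases h : (l.map Prod.fst).count p.1 = 1
    · simp [h]
    · simp [h]
  rw [hpq]

theorem pv_B_main (l : List (String × String)) (hpre : Pre_props_list_to_dict l) :
    props_list_to_dict_alt l = pvSingles l ++ pvExps l := by
  rw [props_list_to_dict_alt]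
  have hstepeq : (fun (r : PySem.Dict String String) (k : String) =>
      if 1 < PySem.Dict.getD (pvCountsB l) k 0 then
        (l.foldl (fun (st : PySem.Dict String String × Int) p =>
          if p.1 == k then (PySem.Dict.insert st.1 (k ++ "_" ++ PySem.Int.toStr st.2) p.2, st.2 + 1)
          else st) (r, 0)).1
      else r) = pvStepB l (fun k => (pvGrp l k).length) := by
    funext r k
    rw [pvStepB, pv_counts_getD l k, pv_cnt_eq_grp_len l k]
  rw [hstepeq, pv_counts_keys l, pv_result0B_eq l]
  have hr0keys : ((l.filter (fun p => decide ((l.map Prod.fst).count p.1 = 1))).foldl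
      (fun r p => PySem.Dict.insert r p.1 p.2) (PySem.Dict.mk [])).keys
      = (l.filter (fun p => decide ((l.map Prod.fst).count p.1 = 1))).map Prod.fst := by
    show ((l.filter (fun p => decide ((l.map Prod.fst).count p.1 = 1))).foldl
      (fun r p => PySem.Dict.insert r p.1 p.2) (PySem.Dict.mk [])).items.map (fun x => x.1) = _
    rw [pv_result0_items l]
  have hB2 := pv_B2 l (pvKS l)
    ((l.filter (fun p => decide ((l.map Prod.fst).count p.1 = 1))).foldl
      (fun r p => PySem.Dict.insert r p.1 p.2) (PySem.Dict.mk []))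
    (by rw [hr0keys]; exact pv_F_keys_nodup l)
    (by
      intro g hg
      rw [hr0keys]
      intro hmem
      rw [pv_genkeys_eq l] at hg
      obtain ⟨p, hp, hpk⟩ := List.mem_map.mp hmem
      have : g ∈ l.map Prod.fst :=
        hpk ▸ List.mem_map_of_mem (List.mem_of_mem_filter hp)
      exact hpre.1 g hg this)
    (by rw [pv_genkeys_eq l]; exact hpre.2)
  rw [hB2, pv_result0_items l, pv_F_eq_singles l, pvExps]

-- ===== VERDICT (by name: the statement is the Claim_ definition above) =====
theorem props_list_to_dict_spec : Claim_equal_props_list_to_dict := by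
  intro l _ hpre
  unfold Spec_props_list_to_dict
  rw [pv_A_main l hpre, pv_B_main l hpre]
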